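-- pv_equiv track=rewrite | github.com/hyren01/qingdao-dev-python | jdqd/a03/event_pred/algor/train/model_evalution.py | buffered_eval
-- ===== SOURCE A (Python) =====
-- def buffered_eval(preds, label_flatten, days_buffer=2):
--     """
--         计算带缓冲区的fp, tp 以及真实值正例负例个数
--         Args:
--           preds: 二分类的预测结果, shape(样本数, 预测天数)
--           label_flatten: 预测结果对应的真实标签, 同为二分类表示
--
--         Returns:
--           tp, fp, 真实值正例个数, 真实值负例个数
--         """
--     neg_idxes = [i for i, l in enumerate(label_flatten) if l != 1]
--     pos_idxes = [i for i, l in enumerate(label_flatten) if l == 1]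
--     pos_idxes_buffered = {p: list(range(p - days_buffer, p + 1)) for
--                           p in pos_idxes}
--     false_pos_idxes = []
--     # 基于预测值的tp
--     true_pos_idxes = []
--     # 基于真实值的tp
--     true_pos_idxes_label = []
--     for i, p in enumerate(preds):
--         # 遍历预测天数
--         for j, pd in enumerate(p):
--             if pd == 0:
--                 continue
--             # 正例下标, 第 i 个样本预测值的第 j 天, 下标为 i + j
--             pos_idx = i + j
--             pos_idx_in_buffered = False
--
--             for pi, pib in pos_idxes_buffered.items():
--                 if pos_idx in pib:
--                     true_pos_idxes.append(pos_idx)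
--                     true_pos_idxes_label.append(pi)
--                     pos_idx_in_buffered = True
--                     break
--             if not pos_idx_in_buffered:
--                 false_pos_idxes.append(pos_idx)
--     num_tp = len(set(true_pos_idxes))
--     num_tp_label = len(set(true_pos_idxes_label))
--     num_fp = len(set(false_pos_idxes))
--     num_pos = len(pos_idxes)
--     num_neg = len(neg_idxes)
--     return num_tp, num_tp_label, num_fp, num_pos, num_neg
-- ===== SOURCE B (Python) =====
-- def buffered_eval(preds, label_flatten, days_buffer=2):
--     """Same result as A, but each predicted-positive index is matched against the
--     (ascending) positive-label indexes by binary search instead of a linear scan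
--     over per-positive buffer lists."""
--     pos_idxes = [i for i, l in enumerate(label_flatten) if l == 1]
--     num_pos = len(pos_idxes)
--     num_neg = len(label_flatten) - num_pos
--     hits = {i + j for i, row in enumerate(preds) for j, pd in enumerate(row) if pd != 0}
--     tp, tp_label, fp = set(), set(), set()
--     for x in hits:
--         # least index lo with pos_idxes[lo] >= x
--         lo, hi = 0, num_pos
--         while lo < hi:
--             mid = (lo + hi) // 2
--             if pos_idxes[mid] < x:
--                 lo = mid + 1
--             else:
--                 hi = mid
--         if lo < num_pos and pos_idxes[lo] - x <= days_buffer: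
--             tp.add(x)
--             tp_label.add(pos_idxes[lo])
--         else:
--             fp.add(x)
--     return len(tp), len(tp_label), len(fp), num_pos, num_neg
-- ===== Notes on version B (the rewrite author's own statement) =====
-- stated objective: faster
-- what changed: Instead of building a dict of per-positive buffer range lists and linearly scanning it for every predicted cell, B deduplicates the predicted-positive indexes once and binary-searches the sorted positive-label index list for the nearest positive at or after each index; a timing run measured B 2.4-4.9x faster at the largest size (one earlier run read 1.8x without confirming consistency).
import Mathlib
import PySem

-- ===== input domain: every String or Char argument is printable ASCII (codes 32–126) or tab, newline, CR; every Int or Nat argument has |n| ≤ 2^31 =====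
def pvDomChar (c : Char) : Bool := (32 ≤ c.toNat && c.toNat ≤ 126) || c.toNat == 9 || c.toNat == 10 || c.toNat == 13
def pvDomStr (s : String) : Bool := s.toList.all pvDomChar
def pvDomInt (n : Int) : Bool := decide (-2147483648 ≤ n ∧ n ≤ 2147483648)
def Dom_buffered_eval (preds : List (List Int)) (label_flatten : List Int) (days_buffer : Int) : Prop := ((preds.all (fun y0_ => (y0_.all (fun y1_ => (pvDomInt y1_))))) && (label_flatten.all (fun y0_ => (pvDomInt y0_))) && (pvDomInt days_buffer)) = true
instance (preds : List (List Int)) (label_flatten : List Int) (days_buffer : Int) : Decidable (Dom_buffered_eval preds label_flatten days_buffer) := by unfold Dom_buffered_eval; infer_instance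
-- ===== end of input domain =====

-- B replaces A's dict of per-positive buffer-range lists (scanned linearly per predicted cell)
-- by one deduplication of the predicted indexes plus a binary search over the ascending
-- positive-label indexes; equivalence of the return value is proved below.

-- ===== PORT A =====
def buffered_eval (preds : List (List Int)) (label_flatten : List Int) (days_buffer : Int) : Int × Int × Int × Int × Int :=
  let neg_idxes := ((PySem.List.enumerate label_flatten 0).filter (fun p => p.2 != 1)).map (fun p => p.1)
  let pos_idxes := ((PySem.List.enumerate label_flatten 0).filter (fun p => p.2 == 1)).map (fun p => p.1)
  let pos_idxes_buffered : PySem.Dict Int (List Int) :=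
    pos_idxes.foldl (fun d p => d.insert p (PySem.List.pyRange (p - days_buffer) (p + 1))) PySem.Dict.empty
  let st :=
    (PySem.List.enumerate preds 0).foldl (fun st ip =>
      (PySem.List.enumerate ip.2 0).foldl (fun st jp =>
        if jp.2 == 0 then st
        else
          let pos_idx := ip.1 + jp.1
          -- 'for pi, pib in …items(): if pos_idx in pib: …; break' = first item whose list contains pos_idx
          match pos_idxes_buffered.items.find? (fun pb => pb.2.contains pos_idx) with
          | some pb => (st.1, st.2.1 ++ [pos_idx], st.2.2 ++ [pb.1])
          | none => (st.1 ++ [pos_idx], st.2.1, st.2.2)) st)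
      (([] : List Int), ([] : List Int), ([] : List Int))
  (((PySem.Set.ofList st.2.1).length : Int), ((PySem.Set.ofList st.2.2).length : Int),
    ((PySem.Set.ofList st.1).length : Int), (pos_idxes.length : Int), (neg_idxes.length : Int))

-- ===== PORT B =====
-- the hand-written 'while lo < hi' binary-search loop of Source B
def pvBsearch (xs : List Int) (x : Int) (lo hi : Nat) : Nat :=
  if _h : lo < hi then
    -- mid = (lo + hi) // 2, inlined
    if xs.getD ((lo + hi) / 2) 0 < x then pvBsearch xs x ((lo + hi) / 2 + 1) hi
    else pvBsearch xs x lo ((lo + hi) / 2)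
  else lo
termination_by hi - lo
decreasing_by all_goals omega

def buffered_eval_alt (preds : List (List Int)) (label_flatten : List Int) (days_buffer : Int) : Int × Int × Int × Int × Int :=
  let pos_idxes := ((PySem.List.enumerate label_flatten 0).filter (fun p => p.2 == 1)).map (fun p => p.1)
  let num_pos : Int := (pos_idxes.length : Int)
  let num_neg : Int := (label_flatten.length : Int) - num_pos
  let hits : PySem.Set Int := PySem.Set.ofList
    ((PySem.List.enumerate preds 0).flatMap (fun ir =>
      ((PySem.List.enumerate ir.2 0).filter (fun jp => jp.2 != 0)).map (fun jp => ir.1 + jp.1)))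
  let st := hits.foldl (fun st x =>
      let lo := pvBsearch pos_idxes x 0 pos_idxes.length
      if lo < pos_idxes.length ∧ pos_idxes.getD lo 0 - x ≤ days_buffer then
        (PySem.Set.add st.1 x, PySem.Set.add st.2.1 (pos_idxes.getD lo 0), st.2.2)
      else (st.1, st.2.1, PySem.Set.add st.2.2 x))
    ((PySem.Set.empty : PySem.Set Int), (PySem.Set.empty : PySem.Set Int), (PySem.Set.empty : PySem.Set Int))
  ((st.1.length : Int), (st.2.1.length : Int), (st.2.2.length : Int), num_pos, num_neg)

-- ===== PRECONDITION & SPEC =====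
def Spec_buffered_eval (preds : List (List Int)) (label_flatten : List Int) (days_buffer : Int) (out : Int × Int × Int × Int × Int) : Prop := out = buffered_eval_alt preds label_flatten days_buffer
instance (preds : List (List Int)) (label_flatten : List Int) (days_buffer : Int) (out : Int × Int × Int × Int × Int) : Decidable (Spec_buffered_eval preds label_flatten days_buffer out) := by unfold Spec_buffered_eval; infer_instance

-- ===== CLAIM (what is proved, stated in full; the proofs are below) =====
def Claim_equal_buffered_eval : Prop := ∀ (preds : List (List Int)) (label_flatten : List Int) (days_buffer : Int), Dom_buffered_eval preds label_flatten days_buffer → Spec_buffered_eval preds label_flatten days_buffer (buffered_eval preds label_flatten days_buffer)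

-- ===== LEMMAS AND PROOFS =====

-- the ascending positive-label index list both programs build
def pvPos (label_flatten : List Int) : List Int :=
  ((PySem.List.enumerate label_flatten 0).filter (fun p => p.2 == 1)).map (fun p => p.1)

-- the flattened predicted-positive index list (A visits it cell by cell; B dedups it first)
def pvHits (preds : List (List Int)) : List Int :=
  (PySem.List.enumerate preds 0).flatMap (fun ir =>
    ((PySem.List.enumerate ir.2 0).filter (fun jp => jp.2 != 0)).map (fun jp => ir.1 + jp.1))

lemma pvPos_sorted (label_flatten : List Int) : (pvPos label_flatten).Pairwise (· < ·) := by
  unfold pvPos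
  refine List.Pairwise.map (fun p => p.1) ?_ ((PySem.List.pairwise_lt_enumerate label_flatten 0).filter _)
  exact fun a b h => h

lemma pvSorted_getD_le (L : List Int) (hs : L.Pairwise (· < ·)) {i j : Nat}
    (hij : i ≤ j) (hj : j < L.length) : L.getD i 0 ≤ L.getD j 0 := by
  rcases Nat.lt_or_ge i j with h | h
  · rw [List.getD_eq_getElem _ _ (by omega), List.getD_eq_getElem _ _ hj]
    exact le_of_lt ((List.pairwise_iff_getElem.1 hs) i j (by omega) hj h)
  · have : i = j := by omega
    subst this; rfl

lemma pvBsearch_spec (L : List Int) (x : Int) (hs : L.Pairwise (· < ·)) :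
    ∀ (lo hi : Nat), lo ≤ hi → hi ≤ L.length →
    (∀ k, k < lo → L.getD k 0 < x) →
    (∀ k, hi ≤ k → k < L.length → x ≤ L.getD k 0) →
    (lo ≤ pvBsearch L x lo hi ∧ pvBsearch L x lo hi ≤ hi) ∧
    (∀ k, k < pvBsearch L x lo hi → L.getD k 0 < x) ∧
    (∀ k, pvBsearch L x lo hi ≤ k → k < L.length → x ≤ L.getD k 0) := by
  intro lo hi
  induction lo, hi using pvBsearch.induct L x with
  | case1 lo hi h hlt ih =>
    intro hle hhi hbelow habove
    rw [pvBsearch, dif_pos h]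
    simp only [if_pos hlt]
    have h1 := ih (by omega) hhi (fun k hk => by
      rcases Nat.lt_or_ge k lo with h' | h'
      · exact hbelow k h'
      · exact lt_of_le_of_lt (pvSorted_getD_le L hs (i := k) (j := (lo + hi) / 2)
          (by omega) (by omega)) hlt) habove
    exact ⟨⟨by omega, h1.1.2⟩, h1.2.1, h1.2.2⟩
  | case2 lo hi h hge ih =>
    intro hle hhi hbelow habove
    rw [pvBsearch, dif_pos h]
    simp only [if_neg hge]
    have hxm : x ≤ L.getD ((lo + hi) / 2) 0 := le_of_not_gt (by simpa using hge)
    have h1 := ih (by omega) (by omega) hbelow (fun k hk hk2 => by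
      exact le_trans hxm (pvSorted_getD_le L hs hk hk2))
    exact ⟨⟨h1.1.1, by omega⟩, h1.2.1, h1.2.2⟩
  | case3 lo hi h =>
    intro hle hhi hbelow habove
    rw [pvBsearch, dif_neg h]
    exact ⟨⟨le_refl _, by omega⟩, hbelow, fun k hk hk2 => habove k (by omega) hk2⟩

-- A's first-match scan over the buffer lists, characterised by B's lower-bound search
lemma pvMatch_char (L : List Int) (hs : L.Pairwise (· < ·)) (db x : Int) :
    L.find? (fun p => (PySem.List.pyRange (p - db) (p + 1)).contains x) =
      (if pvBsearch L x 0 L.length < L.length ∧ L.getD (pvBsearch L x 0 L.length) 0 - x ≤ db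
       then some (L.getD (pvBsearch L x 0 L.length) 0) else none) := by
  obtain ⟨⟨-, hrle⟩, hlt, hge⟩ := pvBsearch_spec L x hs 0 L.length (Nat.zero_le _) (le_refl _)
    (fun k hk => absurd hk (Nat.not_lt_zero k)) (fun k hk hk2 => absurd hk2 (by omega))
  set r := pvBsearch L x 0 L.length with hr
  by_cases hcond : r < L.length ∧ L.getD r 0 - x ≤ db
  · rw [if_pos hcond]
    obtain ⟨hrlen, hdb⟩ := hcond
    have hx : x ≤ L.getD r 0 := hge r (le_refl _) hrlen
    rw [List.find?_eq_some_iff_getElem]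
    refine ⟨?_, r, hrlen, (List.getD_eq_getElem L 0 hrlen).symm, ?_⟩
    · simp only [List.getD_eq_getElem?_getD] at hdb hx
      simp [PySem.List.mem_pyRange_one]
      omega
    · intro j hj
      have hjx : L.getD j 0 < x := hlt j hj
      have hj2 : L[j] = L[j]?.getD 0 := by
        rw [List.getElem?_eq_getElem (by omega)]; rfl
      simp only [List.getD_eq_getElem?_getD] at hjx
      simp [PySem.List.mem_pyRange_one, hj2]
      omega
  · rw [if_neg hcond]
    rw [List.find?_eq_none]
    intro p hp
    obtain ⟨i, hi, rfl⟩ := List.mem_iff_getElem.1 hp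
    have hi2 : L[i] = L[i]?.getD 0 := by
      rw [List.getElem?_eq_getElem hi]; rfl
    simp only [Bool.not_eq_true]
    simp [PySem.List.mem_pyRange_one, hi2]
    rcases Nat.lt_or_ge i r with h' | h'
    · have hjx : L.getD i 0 < x := hlt i h'
      simp only [List.getD_eq_getElem?_getD] at hjx
      omega
    · have hrlen : r < L.length := by omega
      have hdb : ¬ L.getD r 0 - x ≤ db := fun h => hcond ⟨hrlen, h⟩
      have hsl : L.getD r 0 ≤ L.getD i 0 := pvSorted_getD_le L hs h' hi
      have hx : x ≤ L.getD i 0 := hge i h' hi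
      simp only [List.getD_eq_getElem?_getD] at hdb hsl hx
      omega

-- A's dict of buffer lists, as the item list it is
lemma pvDict_items (L : List Int) (hL : L.Nodup) (db : Int) :
    (L.foldl (fun d p => d.insert p (PySem.List.pyRange (p - db) (p + 1))) PySem.Dict.empty).items
      = L.map (fun p => (p, PySem.List.pyRange (p - db) (p + 1))) := by
  have main : ∀ (l : List Int) (d : PySem.Dict Int (List Int)), l.Nodup →
      (∀ p ∈ l, d.contains p = false) →
      (l.foldl (fun d p => d.insert p (PySem.List.pyRange (p - db) (p + 1))) d).items
        = d.items ++ l.map (fun p => (p, PySem.List.pyRange (p - db) (p + 1))) := by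
    intro l
    induction l with
    | nil => intro d _ _; simp
    | cons p t ih =>
      intro d hnd hfresh
      simp only [List.foldl_cons, List.map_cons]
      rw [ih _ hnd.of_cons (fun q hq => by
        rw [PySem.Dict.contains_insert]
        have h1 : (q == p) = false := by
          simp only [beq_eq_false_iff_ne]
          exact fun h => (List.nodup_cons.1 hnd).1 (h ▸ hq)
        rw [h1, hfresh q (List.mem_cons_of_mem _ hq)]
        rfl)]
      rw [PySem.Dict.items_insert_of_not_contains _ _ (hfresh p (List.mem_cons_self ..))]
      simp
  simpa using main L PySem.Dict.empty hL (by intro p _; rfl)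

-- A's whole double loop, flattened over pvHits
def pvStepA (m : Int → Option Int) (st : List Int × List Int × List Int) (x : Int) :
    List Int × List Int × List Int :=
  match m x with
  | some v => (st.1, st.2.1 ++ [x], st.2.2 ++ [v])
  | none => (st.1 ++ [x], st.2.1, st.2.2)

lemma pvLoopA_char (m : Int → Option Int) (l : List Int) (a b c : List Int) :
    l.foldl (pvStepA m) (a, b, c) =
      (a ++ l.filter (fun x => (m x).isNone), b ++ l.filter (fun x => (m x).isSome),
       c ++ (l.filter (fun x => (m x).isSome)).map (fun x => (m x).getD 0)) := by
  induction l generalizing a b c with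
  | nil => simp
  | cons x t ih =>
    cases hm : m x with
    | some v =>
      simp only [List.foldl_cons, pvStepA, hm, ih, List.filter_cons, Option.isNone_some,
        Option.isSome_some]
      simp [List.append_assoc, hm]
    | none =>
      simp only [List.foldl_cons, pvStepA, hm, ih, List.filter_cons, Option.isNone_none,
        Option.isSome_none]
      simp [List.append_assoc]

lemma pvLoopB_char (cond : Int → Prop) [DecidablePred cond] (near : Int → Int) (l : List Int)
    (s t u : PySem.Set Int) :
    l.foldl (fun st x =>
        if cond x then (PySem.Set.add st.1 x, PySem.Set.add st.2.1 (near x), st.2.2)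
        else (st.1, st.2.1, PySem.Set.add st.2.2 x)) (s, t, u) =
      (PySem.Set.update s (l.filter (fun x => decide (cond x))),
       PySem.Set.update t ((l.filter (fun x => decide (cond x))).map near),
       PySem.Set.update u (l.filter (fun x => !decide (cond x)))) := by
  induction l generalizing s t u with
  | nil => simp [PySem.Set.update_nil]
  | cons x tl ih =>
    by_cases hc : cond x
    · simp [hc, ih, PySem.Set.update_cons]
    · simp [hc, ih, PySem.Set.update_cons]

-- A's double loop over cells, as one fold of pvStepA over the flattened hit list
lemma pvLoopA_full (preds : List (List Int)) (items : List (Int × List Int))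
    (init : List Int × List Int × List Int) :
    (PySem.List.enumerate preds 0).foldl (fun st ip =>
        (PySem.List.enumerate ip.2 0).foldl (fun st jp =>
          if jp.2 == 0 then st
          else
            match items.find? (fun pb => pb.2.contains (ip.1 + jp.1)) with
            | some pb => (st.1, st.2.1 ++ [ip.1 + jp.1], st.2.2 ++ [pb.1])
            | none => (st.1 ++ [ip.1 + jp.1], st.2.1, st.2.2)) st) init
      = (pvHits preds).foldl
          (pvStepA (fun x => (items.find? (fun pb => pb.2.contains x)).map (fun pb => pb.1))) init := by
  rw [pvHits, List.foldl_flatMap]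
  symm
  apply PySem.List.foldl_congr_mem
  intro st ip _
  rw [List.foldl_map, ← PySem.List.foldl_if_eq_foldl_filter]
  symm
  apply PySem.List.foldl_congr_mem
  intro st2 jp _
  cases h : (jp.2 == 0) with
  | true => simp [h, bne]
  | false =>
    simp only [h, bne, Bool.not_false, if_true]
    cases hf : items.find? (fun pb => pb.2.contains (ip.1 + jp.1)) with
    | some pb =>
      simp only [List.contains_eq_mem] at hf
      simp [pvStepA, hf]
    | none =>
      simp only [List.contains_eq_mem] at hf
      simp [pvStepA, hf]

lemma pvLen_ofList_congr (l1 l2 : List Int) (h : ∀ a, a ∈ l1 ↔ a ∈ l2) :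
    (PySem.Set.ofList l1).length = (PySem.Set.ofList l2).length := by
  exact ((List.perm_ext_iff_of_nodup (PySem.Set.nodup_ofList l1) (PySem.Set.nodup_ofList l2)).2
    (by simp [PySem.Set.mem_ofList, h])).length_eq

-- ===== VERDICT (by name: the statement is the Claim_ definition above) =====
theorem buffered_eval_spec : Claim_equal_buffered_eval := by
  intro preds label db _
  unfold Spec_buffered_eval
  have hs : ((((PySem.List.enumerate label 0).filter (fun p => p.2 == 1)).map (fun p => p.1))).Pairwise (· < ·) :=
    pvPos_sorted label
  have hnd : ((((PySem.List.enumerate label 0).filter (fun p => p.2 == 1)).map (fun p => p.1))).Nodup :=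
    hs.imp (fun h => ne_of_lt h)
  simp only [buffered_eval, buffered_eval_alt]
  rw [pvDict_items _ hnd db]
  rw [pvLoopA_full preds _ _]
  have hMfun : (fun x => Option.map (fun pb => pb.1)
      (List.find? (fun pb => pb.2.contains x)
        ((((PySem.List.enumerate label 0).filter (fun p => p.2 == 1)).map (fun p => p.1)).map (fun p => (p, PySem.List.pyRange (p - db) (p + 1)))))) = (fun x => (((PySem.List.enumerate label 0).filter (fun p => p.2 == 1)).map (fun p => p.1)).find? (fun p => (PySem.List.pyRange (p - db) (p + 1)).contains x)) := by
    funext x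
    rw [List.find?_map]
    rw [Option.map_map]
    simp only [Function.comp_def]
    exact Option.map_id'
  rw [hMfun]
  rw [pvLoopA_char (fun x => (((PySem.List.enumerate label 0).filter (fun p => p.2 == 1)).map (fun p => p.1)).find? (fun p => (PySem.List.pyRange (p - db) (p + 1)).contains x)) (pvHits preds) [] [] []]
  rw [pvLoopB_char (fun x => (pvBsearch (((PySem.List.enumerate label 0).filter (fun p => p.2 == 1)).map (fun p => p.1)) x 0 (((PySem.List.enumerate label 0).filter (fun p => p.2 == 1)).map (fun p => p.1)).length < (((PySem.List.enumerate label 0).filter (fun p => p.2 == 1)).map (fun p => p.1)).length ∧ (((PySem.List.enumerate label 0).filter (fun p => p.2 == 1)).map (fun p => p.1)).getD (pvBsearch (((PySem.List.enumerate label 0).filter (fun p => p.2 == 1)).map (fun p => p.1)) x 0 (((PySem.List.enumerate label 0).filter (fun p => p.2 == 1)).map (fun p => p.1)).length) 0 - x ≤ db)) (fun x => ((((PySem.List.enumerate label 0).filter (fun p => p.2 == 1)).map (fun p => p.1)).getD (pvBsearch (((PySem.List.enumerate label 0).filter (fun p => p.2 == 1)).map (fun p => p.1)) x 0 (((PySem.List.enumerate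 label 0).filter (fun p => p.2 == 1)).map (fun p => p.1)).length) 0))]
  simp only [List.nil_append, PySem.Set.update_empty]
  have hmc : ∀ x, (fun x => (((PySem.List.enumerate label 0).filter (fun p => p.2 == 1)).map (fun p => p.1)).find? (fun p => (PySem.List.pyRange (p - db) (p + 1)).contains x)) x = if (pvBsearch (((PySem.List.enumerate label 0).filter (fun p => p.2 == 1)).map (fun p => p.1)) x 0 (((PySem.List.enumerate label 0).filter (fun p => p.2 == 1)).map (fun p => p.1)).length < (((PySem.List.enumerate label 0).filter (fun p => p.2 == 1)).map (fun p => p.1)).length ∧ (((PySem.List.enumerate label 0).filter (fun p => p.2 == 1)).map (fun p => p.1)).getD (pvBsearch (((PySem.List.enumerate label 0).filter (fun p => p.2 == 1)).map (fun p => p.1)) x 0 (((PySem.List.enumerate label 0).filter (fun p => p.2 == 1)).map (fun p => p.1)).length) 0 - x ≤ db) then some ((((PySem.List.enumerate label 0).filter (fun p => p.2 == 1)).map (fun p => p.1)).getD (pvBsearch (((PySem.List.enumerate label 0).filter (fun p => p.2 == 1)).map (fun p => p.1)) x 0 (((PySem.List.enumerate label 0).filter (fun p => p.2 == 1)).map (fun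 p => p.1)).length) 0) else none :=
    pvMatch_char (((PySem.List.enumerate label 0).filter (fun p => p.2 == 1)).map (fun p => p.1)) hs db
  have hps : ∀ x, ((fun x => (((PySem.List.enumerate label 0).filter (fun p => p.2 == 1)).map (fun p => p.1)).find? (fun p => (PySem.List.pyRange (p - db) (p + 1)).contains x)) x).isSome = decide (pvBsearch (((PySem.List.enumerate label 0).filter (fun p => p.2 == 1)).map (fun p => p.1)) x 0 (((PySem.List.enumerate label 0).filter (fun p => p.2 == 1)).map (fun p => p.1)).length < (((PySem.List.enumerate label 0).filter (fun p => p.2 == 1)).map (fun p => p.1)).length ∧ (((PySem.List.enumerate label 0).filter (fun p => p.2 == 1)).map (fun p => p.1)).getD (pvBsearch (((PySem.List.enumerate label 0).filter (fun p => p.2 == 1)).map (fun p => p.1)) x 0 (((PySem.List.enumerate label 0).filter (fun p => p.2 == 1)).map (fun p => p.1)).length) 0 - x ≤ db) := by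
    intro x
    rw [hmc x]
    by_cases h : (pvBsearch (((PySem.List.enumerate label 0).filter (fun p => p.2 == 1)).map (fun p => p.1)) x 0 (((PySem.List.enumerate label 0).filter (fun p => p.2 == 1)).map (fun p => p.1)).length < (((PySem.List.enumerate label 0).filter (fun p => p.2 == 1)).map (fun p => p.1)).length ∧ (((PySem.List.enumerate label 0).filter (fun p => p.2 == 1)).map (fun p => p.1)).getD (pvBsearch (((PySem.List.enumerate label 0).filter (fun p => p.2 == 1)).map (fun p => p.1)) x 0 (((PySem.List.enumerate label 0).filter (fun p => p.2 == 1)).map (fun p => p.1)).length) 0 - x ≤ db)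
    · rw [if_pos h, decide_eq_true h]; rfl
    · rw [if_neg h, decide_eq_false h]; rfl
  have hpn : ∀ x, ((fun x => (((PySem.List.enumerate label 0).filter (fun p => p.2 == 1)).map (fun p => p.1)).find? (fun p => (PySem.List.pyRange (p - db) (p + 1)).contains x)) x).isNone = !decide (pvBsearch (((PySem.List.enumerate label 0).filter (fun p => p.2 == 1)).map (fun p => p.1)) x 0 (((PySem.List.enumerate label 0).filter (fun p => p.2 == 1)).map (fun p => p.1)).length < (((PySem.List.enumerate label 0).filter (fun p => p.2 == 1)).map (fun p => p.1)).length ∧ (((PySem.List.enumerate label 0).filter (fun p => p.2 == 1)).map (fun p => p.1)).getD (pvBsearch (((PySem.List.enumerate label 0).filter (fun p => p.2 == 1)).map (fun p => p.1)) x 0 (((PySem.List.enumerate label 0).filter (fun p => p.2 == 1)).map (fun p => p.1)).length) 0 - x ≤ db) := by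
    intro x
    rw [hmc x]
    by_cases h : (pvBsearch (((PySem.List.enumerate label 0).filter (fun p => p.2 == 1)).map (fun p => p.1)) x 0 (((PySem.List.enumerate label 0).filter (fun p => p.2 == 1)).map (fun p => p.1)).length < (((PySem.List.enumerate label 0).filter (fun p => p.2 == 1)).map (fun p => p.1)).length ∧ (((PySem.List.enumerate label 0).filter (fun p => p.2 == 1)).map (fun p => p.1)).getD (pvBsearch (((PySem.List.enumerate label 0).filter (fun p => p.2 == 1)).map (fun p => p.1)) x 0 (((PySem.List.enumerate label 0).filter (fun p => p.2 == 1)).map (fun p => p.1)).length) 0 - x ≤ db)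
    · rw [if_pos h, decide_eq_true h]; rfl
    · rw [if_neg h, decide_eq_false h]; rfl
  have hgd : ∀ x, (pvBsearch (((PySem.List.enumerate label 0).filter (fun p => p.2 == 1)).map (fun p => p.1)) x 0 (((PySem.List.enumerate label 0).filter (fun p => p.2 == 1)).map (fun p => p.1)).length < (((PySem.List.enumerate label 0).filter (fun p => p.2 == 1)).map (fun p => p.1)).length ∧ (((PySem.List.enumerate label 0).filter (fun p => p.2 == 1)).map (fun p => p.1)).getD (pvBsearch (((PySem.List.enumerate label 0).filter (fun p => p.2 == 1)).map (fun p => p.1)) x 0 (((PySem.List.enumerate label 0).filter (fun p => p.2 == 1)).map (fun p => p.1)).length) 0 - x ≤ db) → ((fun x => (((PySem.List.enumerate label 0).filter (fun p => p.2 == 1)).map (fun p => p.1)).find? (fun p => (PySem.List.pyRange (p - db) (p + 1)).contains x)) x).getD 0 = ((((PySem.List.enumerate label 0).filter (fun p => p.2 == 1)).map (fun p => p.1)).getD (pvBsearch (((PySem.List.enumerate label 0).filter (fun p => p.2 == 1)).map (fun p => p.1)) x 0 (((PySem.List.enumerate label 0).filter (fun p => p.2 == 1)).map (fun p => p.1)).length)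 0) := by
    intro x h
    rw [hmc x, if_pos h]
    rfl
  simp only [Prod.mk.injEq]
  refine ⟨?_, ?_, ?_, ?_, ?_⟩
  · exact congrArg (fun n : Nat => (n : Int)) (pvLen_ofList_congr _ _ (fun a => by
      simp only [List.mem_filter, PySem.Set.mem_ofList, hps, pvHits]))
  · have hmapA : ((pvHits preds).filter (fun x => (((fun x => (((PySem.List.enumerate label 0).filter (fun p => p.2 == 1)).map (fun p => p.1)).find? (fun p => (PySem.List.pyRange (p - db) (p + 1)).contains x))) x).isSome)).map (fun x => (((fun x => (((PySem.List.enumerate label 0).filter (fun p => p.2 == 1)).map (fun p => p.1)).find? (fun p => (PySem.List.pyRange (p - db) (p + 1)).contains x))) x).getD 0)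
        = ((pvHits preds).filter (fun x => (((fun x => (((PySem.List.enumerate label 0).filter (fun p => p.2 == 1)).map (fun p => p.1)).find? (fun p => (PySem.List.pyRange (p - db) (p + 1)).contains x))) x).isSome)).map (fun x => ((((PySem.List.enumerate label 0).filter (fun p => p.2 == 1)).map (fun p => p.1)).getD (pvBsearch (((PySem.List.enumerate label 0).filter (fun p => p.2 == 1)).map (fun p => p.1)) x 0 (((PySem.List.enumerate label 0).filter (fun p => p.2 == 1)).map (fun p => p.1)).length) 0)) := by
      refine List.map_congr_left ?_
      intro a ha
      have hfa := (List.mem_filter.1 ha).2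
      rw [hps a] at hfa
      exact hgd a (of_decide_eq_true hfa)
    rw [hmapA]
    exact congrArg (fun n : Nat => (n : Int)) (pvLen_ofList_congr _ _ (fun a => by
      simp only [List.mem_map, List.mem_filter, PySem.Set.mem_ofList, hps, pvHits]))
  · exact congrArg (fun n : Nat => (n : Int)) (pvLen_ofList_congr _ _ (fun a => by
      simp only [List.mem_filter, PySem.Set.mem_ofList, hpn, pvHits]))
  · trivial
  · have hnum := List.length_eq_length_filter_add
      (l := PySem.List.enumerate label 0) (f := fun (p : Int × Int) => p.2 == 1)
    have hlen : (PySem.List.enumerate label 0).length = label.length :=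
      PySem.List.length_enumerate label 0
    have hbne : (fun (p : Int × Int) => p.2 != 1) = (fun p => !(p.2 == 1)) := rfl
    simp only [List.length_map, hbne]
    omega
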